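-- pv_equiv track=rewrite | github.com/NoSpoonLab/nospoon-ai-e2e-agent-test | source/emulator_setup.py | pick_emulator_serial
-- ===== SOURCE A (Python) =====
-- from typing import Dict, List, Optional, Tuple
--
-- def pick_emulator_serial(devices: List[Tuple[str, str]]) -> Optional[str]:
--     """Return the first online emulator serial (emulator-XXXX)."""
--     for serial, state in devices:
--         if serial.startswith("emulator-") and state == "device":
--             return serial
--     # if none is 'device', return any that starts with emulator-
--     for serial, _ in devices:
--         if serial.startswith("emulator-"):
--             return serial
--     return None
-- ===== SOURCE B (Python) =====
-- from typing import List, Optional, Tuple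
--
-- def pick_emulator_serial(devices: List[Tuple[str, str]]) -> Optional[str]:
--     """Return the first online emulator serial (emulator-XXXX)."""
--     fallback: Optional[str] = None
--     for serial, state in devices:
--         if serial.startswith("emulator-"):
--             if state == "device":
--                 return serial
--             if fallback is None:
--                 fallback = serial
--     return fallback
-- ===== Notes on version B (the rewrite author's own statement) =====
-- stated objective: simpler
-- what changed: Replaced A's two sequential passes over devices with a single pass that returns an online emulator immediately and keeps the first emulator-prefixed serial as a fallback.
import Mathlib
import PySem

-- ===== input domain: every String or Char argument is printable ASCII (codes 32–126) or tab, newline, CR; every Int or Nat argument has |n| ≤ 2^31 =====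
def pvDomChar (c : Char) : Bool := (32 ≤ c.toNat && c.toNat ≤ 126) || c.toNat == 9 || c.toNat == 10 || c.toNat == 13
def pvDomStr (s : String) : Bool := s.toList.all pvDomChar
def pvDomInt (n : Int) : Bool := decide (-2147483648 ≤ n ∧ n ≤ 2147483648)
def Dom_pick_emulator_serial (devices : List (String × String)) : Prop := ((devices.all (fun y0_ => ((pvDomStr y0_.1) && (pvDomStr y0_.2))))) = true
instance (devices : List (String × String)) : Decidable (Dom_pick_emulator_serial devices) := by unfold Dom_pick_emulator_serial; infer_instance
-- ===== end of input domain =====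

-- B changes A's two sequential passes into one pass with a first-emulator fallback accumulator; objective: simpler.

-- ===== PORT A =====
-- first loop of A: return the first serial with emulator- prefix and state == "device"
def pickA_online : List (String × String) → Option String
  | [] => none
  | (serial, state) :: rest =>
    if PySem.Str.startswith serial "emulator-" && state == "device" then some serial
    else pickA_online rest

-- second loop of A: return the first serial with emulator- prefix
def pickA_any : List (String × String) → Option String
  | [] => none
  | (serial, _) :: rest =>
    if PySem.Str.startswith serial "emulator-" then some serial
    else pickA_any rest

def pick_emulator_serial (devices : List (String × String)) : Option String :=
  match pickA_online devices with
  | some s => some s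
  | none =>
    match pickA_any devices with
    | some s => some s
    | none => none

-- ===== PORT B =====
-- B's single loop, carrying the fallback variable
def pickB_loop : List (String × String) → Option String → Option String
  | [], fallback => fallback
  | (serial, state) :: rest, fallback =>
    if PySem.Str.startswith serial "emulator-" then
      if state == "device" then some serial
      else pickB_loop rest (if fallback.isNone then some serial else fallback)
    else pickB_loop rest fallback

def pick_emulator_serial_alt (devices : List (String × String)) : Option String :=
  pickB_loop devices none

-- ===== PRECONDITION & SPEC =====
def Spec_pick_emulator_serial (devices : List (String × String)) (out : Option String) : Prop := out = pick_emulator_serial_alt devices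
instance (devices : List (String × String)) (out : Option String) : Decidable (Spec_pick_emulator_serial devices out) := by unfold Spec_pick_emulator_serial; infer_instance

-- ===== CLAIM (what is proved, stated in full; the proofs are below) =====
def Claim_equal_pick_emulator_serial : Prop := ∀ (devices : List (String × String)), Dom_pick_emulator_serial devices → Spec_pick_emulator_serial devices (pick_emulator_serial devices)

-- ===== LEMMAS AND PROOFS =====

-- invariant of B's loop: it equals "first online, else fallback, else first emulator"
theorem pickB_loop_eq (devices : List (String × String)) (fb : Option String) :
    pickB_loop devices fb =
      match pickA_online devices with
      | some s => some s
      | none => match fb with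
        | some f => some f
        | none => pickA_any devices := by
  induction devices generalizing fb with
  | nil => cases fb <;> simp [pickB_loop, pickA_online, pickA_any]
  | cons hd tl ih =>
    obtain ⟨serial, state⟩ := hd
    by_cases hs : PySem.Chars.startswith serial.toList ['e', 'm', 'u', 'l', 'a', 't', 'o', 'r', '-'] = true
    · by_cases hd : state == "device"
      · simp [pickB_loop, pickA_online, hs, hd]
      · cases fb <;>
          simp [pickB_loop, pickA_online, pickA_any, hs, hd, ih, Option.isNone]
    · simp [pickB_loop, pickA_online, pickA_any, hs, ih]

-- ===== VERDICT (by name: the statement is the Claim_ definition above) =====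
theorem pick_emulator_serial_spec : Claim_equal_pick_emulator_serial := by
  intro devices _
  unfold Spec_pick_emulator_serial pick_emulator_serial pick_emulator_serial_alt
  rw [pickB_loop_eq]
  cases pickA_online devices <;> cases pickA_any devices <;> rfl
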